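-- pv_equiv track=rewrite | github.com/gadelha2005/Trabalho2Grafos | grafos.py | bondy_chvatal
-- ===== SOURCE A (Python) =====
-- import copy
--
-- def grau(grafo, vertice):
--     return len(grafo[vertice])
--
-- def bondy_chvatal(grafo):
--     fechamento = copy.deepcopy(grafo)
--     num_vertices = len(fechamento)
--
--     if num_vertices < 3:
--         return False
--
--     houve_mudanca = True
--     while houve_mudanca:
--
--         houve_mudanca = False
--         vertices = list(fechamento.keys())
--
--         for i, u in enumerate(vertices):
--             for vertice in vertices[i+1:]:
--
--                 nao_adjacentes = vertice not in fechamento[u]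
--                 soma_graus_suficiente = grau(fechamento, u) + grau(fechamento, vertice) >= num_vertices
--
--                 if nao_adjacentes and soma_graus_suficiente:
--                     fechamento[u].append(vertice)
--                     fechamento[vertice].append(u)
--                     houve_mudanca = True
--
--     eh_completo = True
--
--     for vertice in fechamento:
--         if grau(fechamento, vertice) != num_vertices - 1:
--             eh_completo = False
--
--     return eh_completo
-- ===== SOURCE B (Python) =====
-- def bondy_chvatal(grafo):
--     n = len(grafo)
--     if n < 3:
--         return False
--
--     verts = list(grafo)
--     deg = {v: len(grafo[v]) for v in verts}
--     # candidate pairs, i.e. the non-edges as seen from the earlier vertex;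
--     # computed once, then only degrees are tracked
--     pending = [(u, v) for i, u in enumerate(verts)
--                for v in verts[i + 1:] if v not in grafo[u]]
--
--     progress = True
--     while progress:
--         progress = False
--         remaining = []
--         for u, v in pending:
--             if deg[u] + deg[v] >= n:
--                 deg[u] += 1
--                 deg[v] += 1
--                 progress = True
--             else:
--                 remaining.append((u, v))
--         pending = remaining
--
--     return all(d == n - 1 for d in deg.values())
-- ===== Notes on version B (the rewrite author's own statement) =====
-- stated objective: faster
-- what changed: A rescans every vertex pair each round, testing non-adjacency by membership in a growing dict-of-lists and re-deriving degrees from list lengths; B computes the list of non-adjacent candidate pairs once up front, then runs rounds that keep only a running degree table and a shrinking pending list (no adjacency structure is maintained or searched at all).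
import Mathlib
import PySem

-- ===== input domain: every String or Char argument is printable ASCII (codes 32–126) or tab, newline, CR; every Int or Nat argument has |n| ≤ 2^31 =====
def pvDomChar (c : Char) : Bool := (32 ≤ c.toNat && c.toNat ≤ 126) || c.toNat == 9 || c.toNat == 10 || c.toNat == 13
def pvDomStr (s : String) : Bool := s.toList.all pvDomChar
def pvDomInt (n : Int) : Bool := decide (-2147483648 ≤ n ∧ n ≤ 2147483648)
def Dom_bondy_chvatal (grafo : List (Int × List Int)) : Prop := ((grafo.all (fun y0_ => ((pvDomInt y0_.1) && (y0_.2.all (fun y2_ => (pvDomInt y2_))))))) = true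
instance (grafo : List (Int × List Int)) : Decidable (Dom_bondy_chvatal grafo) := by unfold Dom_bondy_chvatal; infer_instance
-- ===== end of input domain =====

-- B replaces A's repeated full rescans of a growing dict-of-lists by one precomputation of the
-- non-adjacent candidate pairs followed by degree-only passes over a shrinking pending list.

-- ===== PORT A =====

-- len(grafo[vertice]); 'vertice' is always a key of the dict wherever A calls grau
def grau (grafo : PySem.Dict Int (List Int)) (vertice : Int) : Int :=
  ((grafo.getD vertice []).length : Int)

-- the body of A's inner double loop, at the pair p = (u, vertice)
def stepA (n : Int) (st : PySem.Dict Int (List Int) × Bool) (p : Int × Int) :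
    PySem.Dict Int (List Int) × Bool :=
  let nao_adjacentes := !decide (p.2 ∈ st.1.getD p.1 [])
  let soma_graus_suficiente := decide (grau st.1 p.1 + grau st.1 p.2 ≥ n)
  if nao_adjacentes && soma_graus_suficiente then
    ((st.1.modify p.1 [] (· ++ [p.2])).modify p.2 [] (· ++ [p.1]), true)
  else st

-- one iteration of A's while loop: 'for i, u in enumerate(vertices): for vertice in vertices[i+1:]: …'
def passA (n : Int) (fech : PySem.Dict Int (List Int)) : PySem.Dict Int (List Int) × Bool :=
  let vertices := fech.keys
  (PySem.List.enumerate vertices 0).foldl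
    (fun st iu =>
      (PySem.List.slice vertices (some (iu.1 + 1)) none).foldl
        (fun st v => stepA n st (iu.2, v)) st)
    (fech, false)

-- 'while houve_mudanca: …'; fuel bounds the while loop: every repeated pass has added at least one
-- of the at most (#keys)² addable edges, so the fuel passed below is never exhausted
def loopA (n : Int) : Nat → PySem.Dict Int (List Int) → PySem.Dict Int (List Int)
  | 0, fech => fech
  | fuel + 1, fech =>
    let st := passA n fech
    if st.2 then loopA n fuel st.1 else st.1

def bondy_chvatal (grafo : List (Int × List Int)) : Bool :=
  let fechamento := PySem.Dict.ofList grafo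
  let num_vertices : Int := (fechamento.size : Int)
  if num_vertices < 3 then false
  else
    let final := loopA num_vertices (grafo.length * grafo.length + 2) fechamento
    -- 'for vertice in fechamento: if grau(...) != num_vertices - 1: eh_completo = False'
    final.keys.foldl (fun acc v => if grau final v ≠ num_vertices - 1 then false else acc) true

-- ===== PORT B =====

-- the body of B's 'for u, v in pending' loop; state = (deg, remaining, progress)
def stepB (n : Int) (st : PySem.Dict Int Int × List (Int × Int) × Bool) (p : Int × Int) :
    PySem.Dict Int Int × List (Int × Int) × Bool :=
  if st.1.getD p.1 0 + st.1.getD p.2 0 ≥ n then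
    ((st.1.modify p.1 0 (· + 1)).modify p.2 0 (· + 1), st.2.1, true)
  else (st.1, st.2.1 ++ [p], st.2.2)

-- 'while progress: …' over (deg, pending); same fuel bound as loopA (same loop-count argument)
def loopB (n : Int) : Nat → PySem.Dict Int Int → List (Int × Int) → PySem.Dict Int Int
  | 0, deg, _ => deg
  | fuel + 1, deg, pending =>
    let st := pending.foldl (stepB n) (deg, [], false)
    if st.2.2 then loopB n fuel st.1 st.2.1 else st.1

def bondy_chvatal_alt (grafo : List (Int × List Int)) : Bool :=
  let g := PySem.Dict.ofList grafo
  let n : Int := (g.size : Int)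
  if n < 3 then false
  else
    let verts := g.keys
    let deg := verts.foldl (fun d v => d.insert v ((g.getD v []).length : Int)) PySem.Dict.empty
    let pending := (PySem.List.enumerate verts 0).flatMap (fun iu =>
      ((PySem.List.slice verts (some (iu.1 + 1)) none).filter
        (fun v => !decide (v ∈ g.getD iu.2 []))).map (fun v => (iu.2, v)))
    let final := loopB n (grafo.length * grafo.length + 2) deg pending
    final.values.all (fun d => d == n - 1)

-- ===== PRECONDITION & SPEC =====
def Spec_bondy_chvatal (grafo : List (Int × List Int)) (out : Bool) : Prop := out = bondy_chvatal_alt grafo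
instance (grafo : List (Int × List Int)) (out : Bool) : Decidable (Spec_bondy_chvatal grafo out) := by unfold Spec_bondy_chvatal; infer_instance

-- ===== CLAIM (what is proved, stated in full; the proofs are below) =====
def Claim_equal_bondy_chvatal : Prop := ∀ (grafo : List (Int × List Int)), Dom_bondy_chvatal grafo → Spec_bondy_chvatal grafo (bondy_chvatal grafo)

-- ===== LEMMAS AND PROOFS =====

-- the ordered pairs (u, later v) that A's double loop ranges over
def ordPairs : List Int → List (Int × Int)
  | [] => []
  | u :: rest => rest.map (fun v => (u, v)) ++ ordPairs rest

-- 'p.2 is still non-adjacent to p.1' in dict d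
def openP (d : PySem.Dict Int (List Int)) (p : Int × Int) : Bool :=
  !decide (p.2 ∈ d.getD p.1 [])

-- p is an ordered pair of distinct vertices of vs
def OrderedP (vs : List Int) (p : Int × Int) : Prop :=
  p.1 ∈ vs ∧ p.2 ∈ vs ∧ vs.idxOf p.1 < vs.idxOf p.2

-- coupling invariant between A's dict-of-lists and B's degree dict
def BcInv (vs : List Int) (fech : PySem.Dict Int (List Int)) (deg : PySem.Dict Int Int) : Prop :=
  fech.keys = vs ∧ deg.keys = vs ∧
  ∀ v ∈ vs, deg.getD v 0 = ((fech.getD v []).length : Int)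


theorem getD_stepA (n : Int) (st : PySem.Dict Int (List Int) × Bool) (p : Int × Int) (a : Int) :
    ∃ ext, (stepA n st p).1.getD a [] = st.1.getD a [] ++ ext ∧
      ∀ x ∈ ext, (a = p.1 ∧ x = p.2) ∨ (a = p.2 ∧ x = p.1) := by
  unfold stepA
  dsimp only
  split
  · simp only [PySem.Dict.getD_modify]
    by_cases h2 : a = p.2
    · by_cases h21 : p.2 = p.1
      · exact ⟨[p.2, p.1], by simp [h2, h21], by simp [h2, h21]⟩
      · exact ⟨[p.1], by simp [h2, h21], by simp [h2]⟩
    · by_cases h1 : a = p.1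
      · have h12 : ¬ p.1 = p.2 := h1 ▸ h2
        exact ⟨[p.2], by simp [h1, h12], by simp [h1]⟩
      · exact ⟨[], by simp [h2, h1], by simp⟩
  · exact ⟨[], by simp, by simp⟩

theorem getD_foldA (n : Int) (rest : List (Int × Int)) :
    ∀ (st : PySem.Dict Int (List Int) × Bool) (a : Int),
    ∃ ext, (rest.foldl (stepA n) st).1.getD a [] = st.1.getD a [] ++ ext ∧
      ∀ x ∈ ext, ∃ q ∈ rest, (a = q.1 ∧ x = q.2) ∨ (a = q.2 ∧ x = q.1) := by
  induction rest with
  | nil => exact fun st a => ⟨[], by simp, by simp⟩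
  | cons p rest ih =>
    intro st a
    obtain ⟨e1, he1, hp1⟩ := getD_stepA n st p a
    obtain ⟨e2, he2, hp2⟩ := ih (stepA n st p) a
    refine ⟨e1 ++ e2, by simp [List.foldl_cons, he2, he1], ?_⟩
    intro x hx
    rcases List.mem_append.mp hx with h | h
    · exact ⟨p, List.mem_cons_self .., hp1 x h⟩
    · obtain ⟨q, hq, hq2⟩ := hp2 x h
      exact ⟨q, List.mem_cons_of_mem _ hq, hq2⟩

theorem ordPairs_mem (vs : List Int) : ∀ p ∈ ordPairs vs, p.1 ∈ vs ∧ p.2 ∈ vs := by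
  induction vs with
  | nil => simp [ordPairs]
  | cons u rest ih =>
    intro p hp
    rcases List.mem_append.mp hp with h | h
    · obtain ⟨v, hv, rfl⟩ := List.mem_map.mp h
      exact ⟨List.mem_cons_self .., List.mem_cons_of_mem _ hv⟩
    · exact ⟨List.mem_cons_of_mem _ (ih p h).1, List.mem_cons_of_mem _ (ih p h).2⟩

theorem ordPairs_ordered (vs : List Int) (h : vs.Nodup) : ∀ p ∈ ordPairs vs, OrderedP vs p := by
  induction vs with
  | nil => simp [ordPairs]
  | cons u rest ih =>
    intro p hp
    have hu : u ∉ rest := (List.nodup_cons.mp h).1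
    rcases List.mem_append.mp hp with hm | hm
    · obtain ⟨v, hv, rfl⟩ := List.mem_map.mp hm
      have hvu : v ≠ u := fun hh => hu (hh ▸ hv)
      refine ⟨List.mem_cons_self .., List.mem_cons_of_mem _ hv, ?_⟩
      dsimp only
      rw [List.idxOf_cons_self, List.idxOf_cons_ne _ (Ne.symm hvu)]
      exact Nat.succ_pos _
    · obtain ⟨h1, h2, hlt⟩ := ih (List.nodup_cons.mp h).2 p hm
      have hm1 := (ordPairs_mem rest p hm).1
      have hm2 := (ordPairs_mem rest p hm).2
      have hne1 : p.1 ≠ u := fun hh => hu (hh ▸ hm1)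
      have hne2 : p.2 ≠ u := fun hh => hu (hh ▸ hm2)
      refine ⟨List.mem_cons_of_mem _ h1, List.mem_cons_of_mem _ h2, ?_⟩
      rw [List.idxOf_cons_ne _ (Ne.symm hne1), List.idxOf_cons_ne _ (Ne.symm hne2)]
      exact Nat.succ_lt_succ hlt

theorem ordPairs_nodup (vs : List Int) (h : vs.Nodup) : (ordPairs vs).Nodup := by
  induction vs with
  | nil => simp [ordPairs]
  | cons u rest ih =>
    have hu : u ∉ rest := (List.nodup_cons.mp h).1
    have hr := (List.nodup_cons.mp h).2
    refine List.Nodup.append ?_ (ih hr) ?_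
    · exact hr.map (fun a b hab => (Prod.mk.injEq u a u b).mp hab |>.2)
    · intro x hx hx2
      obtain ⟨v, hv, rfl⟩ := List.mem_map.mp hx
      exact hu ((ordPairs_mem rest _ hx2).1)

theorem not_swap (vs : List Int) (p q : Int × Int) (hp : OrderedP vs p) (hq : OrderedP vs q) :
    ¬(p.1 = q.2 ∧ p.2 = q.1) := by
  rintro ⟨h1, h2⟩
  have ha := hp.2.2
  have hb := hq.2.2
  rw [h1, h2] at ha
  omega

theorem keys_modify_mem {ν : Type} (d : PySem.Dict Int ν) (k : Int) (d0 : ν) (f : ν → ν)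
    (h : k ∈ d.keys) : (d.modify k d0 f).keys = d.keys := by
  rw [PySem.Dict.keys_modify, PySem.Dict.keys_insert_of_contains]
  exact (PySem.Dict.contains_iff_mem_keys d k).mpr h

theorem openP_mono (n : Int) (rest : List (Int × Int)) (st : PySem.Dict Int (List Int) × Bool)
    (p : Int × Int) (h : openP st.1 p = false) :
    openP (rest.foldl (stepA n) st).1 p = false := by
  obtain ⟨ext, he, -⟩ := getD_foldA n rest st p.1
  simp only [openP, Bool.not_eq_eq_eq_not, Bool.not_false, decide_eq_true_eq] at h ⊢
  rw [he]
  exact List.mem_append_left _ h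

theorem openP_stays (n : Int) (vs : List Int) (rest : List (Int × Int))
    (st : PySem.Dict Int (List Int) × Bool) (p : Int × Int)
    (hord : ∀ q ∈ rest, OrderedP vs q) (hp : OrderedP vs p) (hpnr : p ∉ rest)
    (h : openP st.1 p = true) :
    openP (rest.foldl (stepA n) st).1 p = true := by
  obtain ⟨ext, he, hprop⟩ := getD_foldA n rest st p.1
  simp only [openP, Bool.not_eq_eq_eq_not, Bool.not_true, decide_eq_false_iff_not] at h ⊢
  rw [he]
  intro hmem
  rcases List.mem_append.mp hmem with hm | hm
  · exact h hm
  · obtain ⟨q, hq, hcase⟩ := hprop p.2 hm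
    rcases hcase with ⟨ha, hb⟩ | ⟨ha, hb⟩
    · exact hpnr (by rwa [show p = q from Prod.ext ha hb] )
    · exact not_swap vs p q (hp) (hord q hq) ⟨ha, hb⟩

theorem pass_bisim (n : Int) (vs : List Int) :
    ∀ (rest : List (Int × Int)) (fech : PySem.Dict Int (List Int)) (deg : PySem.Dict Int Int)
      (rem : List (Int × Int)) (flag : Bool),
      (∀ p ∈ rest, OrderedP vs p) → rest.Nodup → BcInv vs fech deg →
      BcInv vs (rest.foldl (stepA n) (fech, flag)).1
        ((rest.filter (openP fech)).foldl (stepB n) (deg, rem, flag)).1 ∧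
      ((rest.filter (openP fech)).foldl (stepB n) (deg, rem, flag)).2.2
        = (rest.foldl (stepA n) (fech, flag)).2 ∧
      ((rest.filter (openP fech)).foldl (stepB n) (deg, rem, flag)).2.1
        = rem ++ rest.filter (openP (rest.foldl (stepA n) (fech, flag)).1) := by
  intro rest
  induction rest with
  | nil => exact fun fech deg rem flag _ _ hinv => ⟨hinv, rfl, by simp⟩
  | cons p rest ih =>
    intro fech deg rem flag hord hnd hinv
    have hpO := hord p (List.mem_cons_self ..)
    obtain ⟨hp1v, hp2v, hplt⟩ := hpO
    have hp12 : p.1 ≠ p.2 := fun hh => by rw [hh] at hplt; exact lt_irrefl _ hplt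
    have hndr : rest.Nodup := (List.nodup_cons.mp hnd).2
    have hpnr : p ∉ rest := (List.nodup_cons.mp hnd).1
    have hordr : ∀ q ∈ rest, OrderedP vs q := fun q hq => hord q (List.mem_cons_of_mem _ hq)
    obtain ⟨hkf, hkd, hlen⟩ := hinv
    simp only [List.foldl_cons, List.filter_cons]
    by_cases hop : openP fech p = true
    · -- candidate pair, still pending on both sides
      have hdegeq : deg.getD p.1 0 + deg.getD p.2 0 = grau fech p.1 + grau fech p.2 := by
        rw [hlen p.1 hp1v, hlen p.2 hp2v]; rfl
      by_cases hcond : grau fech p.1 + grau fech p.2 ≥ n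
      · -- fire: both add the edge
        have hstepA : stepA n (fech, flag) p =
            ((fech.modify p.1 [] (· ++ [p.2])).modify p.2 [] (· ++ [p.1]), true) := by
          simp only [openP] at hop
          simp [stepA, hop, hcond]
        have hstepB : stepB n (deg, rem, flag) p =
            ((deg.modify p.1 0 (· + 1)).modify p.2 0 (· + 1), rem, true) := by
          simp [stepB, hdegeq ▸ hcond]
        set fech' := (fech.modify p.1 [] (· ++ [p.2])).modify p.2 [] (· ++ [p.1]) with hf'
        set deg' := (deg.modify p.1 0 (· + 1)).modify p.2 0 (· + 1) with hd'
        have hkf' : fech'.keys = vs := by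
          rw [hf', keys_modify_mem, keys_modify_mem]
          · exact hkf
          · rw [hkf]; exact hp1v
          · rw [keys_modify_mem _ _ _ _ (by rw [hkf]; exact hp1v), hkf]; exact hp2v
        have hkd' : deg'.keys = vs := by
          rw [hd', keys_modify_mem, keys_modify_mem]
          · exact hkd
          · rw [hkd]; exact hp1v
          · rw [keys_modify_mem _ _ _ _ (by rw [hkd]; exact hp1v), hkd]; exact hp2v
        have hinv' : BcInv vs fech' deg' := by
          refine ⟨hkf', hkd', fun v hv => ?_⟩
          rw [hf', hd']
          simp only [PySem.Dict.getD_modify]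
          by_cases h2 : v = p.2 <;> by_cases h1 : v = p.1 <;>
            simp [h1, h2, hp12, Ne.symm hp12, hlen p.1 hp1v, hlen p.2 hp2v, hlen v hv]
        have hfilt : rest.filter (openP fech) = rest.filter (openP fech') := by
          refine List.filter_congr fun q hq => ?_
          have hqO := hordr q hq
          have hqp : q ≠ p := fun hh => hpnr (hh ▸ hq)
          simp only [openP, hf', PySem.Dict.getD_modify]
          by_cases hq1 : q.1 = p.2
          · rw [if_pos hq1, if_neg (Ne.symm hp12)]
            have : q.2 ≠ p.1 := fun hh => not_swap vs q p hqO ⟨hp1v, hp2v, hplt⟩ ⟨hq1, hh⟩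
            simp [this, hq1]
          · rw [if_neg hq1]
            by_cases hq1' : q.1 = p.1
            · rw [if_pos hq1']
              have : q.2 ≠ p.2 := fun hh => hqp (Prod.ext (hq1'.trans rfl) hh)
              simp [this, hq1']
            · rw [if_neg hq1']
        rw [hstepA, if_pos hop, List.foldl_cons, hstepB, hfilt]
        obtain ⟨g1, g2, g3⟩ := ih fech' deg' rem true hordr hndr hinv'
        refine ⟨g1, g2, ?_⟩
        rw [g3]
        have hclosed : openP (rest.foldl (stepA n) (fech', true)).1 p = false := by
          refine openP_mono n rest (fech', true) p ?_
          simp [openP, hf', PySem.Dict.getD_modify, hp12]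
        rw [hclosed]
        simp
      · -- degree sum too small: A keeps the state, B retains the pair
        have hstepA : stepA n (fech, flag) p = (fech, flag) := by
          simp [stepA, hcond]
        have hstepB : stepB n (deg, rem, flag) p = (deg, rem ++ [p], flag) := by
          simp [stepB, hdegeq ▸ hcond]
        rw [hstepA, if_pos hop, List.foldl_cons, hstepB]
        obtain ⟨g1, g2, g3⟩ := ih fech deg (rem ++ [p]) flag hordr hndr ⟨hkf, hkd, hlen⟩
        refine ⟨g1, g2, ?_⟩
        rw [g3]
        have hopen : openP (rest.foldl (stepA n) (fech, flag)).1 p = true :=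
          openP_stays n vs rest (fech, flag) p hordr ⟨hp1v, hp2v, hplt⟩ hpnr hop
        rw [hopen]
        simp
    · -- already adjacent: A's guard fails, B never queued the pair
      have hop' : openP fech p = false := by simpa using hop
      have hstepA : stepA n (fech, flag) p = (fech, flag) := by
        simp only [openP] at hop'
        simp [stepA, hop']
      rw [hstepA, if_neg (by simp [hop'])]
      obtain ⟨g1, g2, g3⟩ := ih fech deg rem flag hordr hndr ⟨hkf, hkd, hlen⟩
      refine ⟨g1, g2, ?_⟩
      rw [g3]
      have hclosed : openP (rest.foldl (stepA n) (fech, flag)).1 p = false :=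
        openP_mono n rest (fech, flag) p hop'
      rw [hclosed]
      simp

theorem passA_flat (n : Int) (vs : List Int) :
    ∀ (l : List Int) (k : Nat) (st : PySem.Dict Int (List Int) × Bool), vs.drop k = l →
      (PySem.List.enumerate l (k : Int)).foldl
        (fun st iu =>
          (PySem.List.slice vs (some (iu.1 + 1)) none).foldl
            (fun st v => stepA n st (iu.2, v)) st) st
      = (ordPairs l).foldl (stepA n) st := by
  intro l
  induction l with
  | nil => intro k st h; simp [PySem.List.enumerate, ordPairs]
  | cons u rest ih =>
    intro k st h
    have hdrop : vs.drop (k + 1) = rest := by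
      rw [← List.tail_drop, h]; rfl
    rw [PySem.List.enumerate_cons, List.foldl_cons]
    have hcast : (k : Int) + 1 = ((k + 1 : Nat) : Int) := by push_cast; ring
    rw [hcast, PySem.List.slice_from_natCast, hdrop, ih (k + 1) _ hdrop]
    rw [show (rest.foldl (fun st v => stepA n st (u, v)) st)
        = (rest.map (fun v => (u, v))).foldl (stepA n) st from (List.foldl_map ..).symm]
    rw [show ordPairs (u :: rest) = rest.map (fun v => (u, v)) ++ ordPairs rest from rfl,
      List.foldl_append]

theorem pending_flat (g : PySem.Dict Int (List Int)) (vs : List Int) :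
    ∀ (l : List Int) (k : Nat), vs.drop k = l →
      (PySem.List.enumerate l (k : Int)).flatMap (fun iu =>
        ((PySem.List.slice vs (some (iu.1 + 1)) none).filter
          (fun v => !decide (v ∈ g.getD iu.2 []))).map (fun v => (iu.2, v)))
      = (ordPairs l).filter (openP g) := by
  intro l
  induction l with
  | nil => intro k h; simp [PySem.List.enumerate, ordPairs]
  | cons u rest ih =>
    intro k h
    have hdrop : vs.drop (k + 1) = rest := by
      rw [← List.tail_drop, h]; rfl
    rw [PySem.List.enumerate_cons, List.flatMap_cons]
    have hcast : (k : Int) + 1 = ((k + 1 : Nat) : Int) := by push_cast; ring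
    rw [hcast, PySem.List.slice_from_natCast, hdrop, ih (k + 1) hdrop]
    rw [show ordPairs (u :: rest) = rest.map (fun v => (u, v)) ++ ordPairs rest from rfl,
      List.filter_append, List.filter_map]
    rfl

theorem loop_bisim (n : Int) (vs : List Int) (hvs : vs.Nodup) :
    ∀ (fuel : Nat) (fech : PySem.Dict Int (List Int)) (deg : PySem.Dict Int Int),
      BcInv vs fech deg →
      BcInv vs (loopA n fuel fech) (loopB n fuel deg ((ordPairs vs).filter (openP fech))) := by
  intro fuel
  induction fuel with
  | zero => intro fech deg hinv; exact hinv
  | succ fuel ih =>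
    intro fech deg hinv
    simp only [loopA, loopB]
    have hpass := pass_bisim n vs (ordPairs vs) fech deg [] false
      (ordPairs_ordered vs hvs) (ordPairs_nodup vs hvs) hinv
    have hA : passA n fech = (ordPairs vs).foldl (stepA n) (fech, false) := by
      rw [passA]
      have hk : fech.keys = vs := hinv.1
      rw [hk]
      exact passA_flat n vs vs 0 (fech, false) rfl
    obtain ⟨g1, g2, g3⟩ := hpass
    rw [hA, ← g2]
    split
    · rw [g3]
      simp only [List.nil_append]
      exact ih _ _ g1
    · exact g1

theorem deg_init (g : PySem.Dict Int (List Int)) (hnd : g.keys.Nodup) :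
    BcInv g.keys g
      (g.keys.foldl (fun d v => d.insert v ((g.getD v []).length : Int)) PySem.Dict.empty) := by
  have hitems := PySem.Dict.items_foldl_insert_fresh g.keys (fun a => a)
    (fun a => ((g.getD a []).length : Int)) PySem.Dict.empty
    (fun a _ => PySem.Dict.contains_empty a) (by simpa using hnd)
  have hitems' : (g.keys.foldl (fun d v => d.insert v ((g.getD v []).length : Int))
      PySem.Dict.empty).items = g.keys.map (fun a => (a, ((g.getD a []).length : Int))) := by
    rw [hitems]; rfl
  have hkeys : (g.keys.foldl (fun d v => d.insert v ((g.getD v []).length : Int))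
      PySem.Dict.empty).keys = g.keys := by
    rw [PySem.Dict.keys_foldl_insert, PySem.Dict.keys_empty, PySem.Set.update_nil_left]
    exact PySem.Set.ofList_eq_self_of_nodup _ hnd
  refine ⟨rfl, hkeys, fun v hv => ?_⟩
  refine PySem.Dict.getD_of_mem_items _ ?_ (by rw [hkeys]; exact hnd) 0
  rw [hitems']
  exact List.mem_map.mpr ⟨v, hv, rfl⟩

theorem foldl_flag {α : Type} (l : List α) (p : α → Prop) [DecidablePred p] :
    ∀ acc : Bool, l.foldl (fun acc v => if p v then false else acc) acc
      = (acc && l.all fun v => decide ¬ p v) := by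
  induction l with
  | nil => intro acc; simp
  | cons x l ih =>
    intro acc
    by_cases hp : p x
    · rw [List.foldl_cons, if_pos hp, ih]
      simp [List.all_cons, hp]
    · rw [List.foldl_cons, if_neg hp, ih]
      simp [List.all_cons, hp]

theorem all_congr_mem {α : Type} (l : List α) (f g : α → Bool)
    (h : ∀ x ∈ l, f x = g x) : l.all f = l.all g := by
  induction l with
  | nil => rfl
  | cons x l ih =>
    rw [List.all_cons, List.all_cons, h x (List.mem_cons_self ..),
      ih fun x hx => h x (List.mem_cons_of_mem _ hx)]

theorem main_eq (grafo : List (Int × List Int)) : bondy_chvatal grafo = bondy_chvatal_alt grafo := by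
  unfold bondy_chvatal bondy_chvatal_alt
  by_cases h3 : (((PySem.Dict.ofList grafo).size : Int) < 3)
  · simp [h3]
  · simp only [if_neg h3]
    set g := PySem.Dict.ofList grafo with hg
    set n : Int := (g.size : Int) with hn
    have hnd : g.keys.Nodup := PySem.Dict.nodup_keys_ofList grafo
    have hinit := deg_init g hnd
    have hpend := pending_flat g g.keys g.keys 0 rfl
    simp only [Nat.cast_zero] at hpend
    rw [hpend]
    have hloop := loop_bisim n g.keys hnd (grafo.length * grafo.length + 2) g _ hinit
    obtain ⟨hkF, hkD, hlenF⟩ := hloop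
    rw [hkF, foldl_flag g.keys (fun v => grau (loopA n (grafo.length * grafo.length + 2) g) v ≠ n - 1)]
    rw [PySem.Dict.values_eq_map_keys (loopB n (grafo.length * grafo.length + 2)
        (g.keys.foldl (fun d v => d.insert v ((g.getD v []).length : Int)) PySem.Dict.empty)
        ((ordPairs g.keys).filter (openP g))) (by rw [hkD]; exact hnd) 0]
    rw [hkD, List.all_map]
    simp only [Bool.true_and]
    refine all_congr_mem _ _ _ fun v hv => ?_
    have hl := hlenF v hv
    simp only [Function.comp_apply, hl, grau]
    simp [ne_eq, Bool.beq_eq_decide_eq]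

-- ===== VERDICT (by name: the statement is the Claim_ definition above) =====
theorem bondy_chvatal_spec : Claim_equal_bondy_chvatal := by
  intro grafo _
  unfold Spec_bondy_chvatal
  exact main_eq grafo
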